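-- pv_equiv track=rewrite | github.com/SHHUUBBH/CONTRA | core/image_generator.py | _analyze_with_rules
-- ===== SOURCE A (Python) =====
-- from typing import Dict, List, Any, Optional, Tuple
--
-- def _analyze_with_rules(topic: str, context_text: str, tone: Optional[str] = None) -> Tuple[str, Optional[str]]:
--     """
--     Use rule-based approach to determine style and emotion.
--
--     Considers the specified tone to match image style with narrative tone.
--
--     Args:
--         topic: The main topic
--         context_text: Additional context information
--         tone: Narrative tone (e.g., "informative", "dramatic", "poetic")
--
--     Returns:
--         Tuple of (style, emotion)
--     """
--     # Prioritize tone-based style selection if tone is provided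
--     if tone:
--         # Map narrative tones to appropriate image styles and emotions
--         tone_style_map = {
--             "dramatic": ("cinematic", "intense"),
--             "poetic": ("artistic", "contemplative"),
--             "humorous": ("cartoon", "playful"),
--             "technical": ("digital art", "precise"),
--             "simple": ("minimalist", "calm"),
--             "informative": ("realistic", "neutral")
--         }
--
--         # If tone is in our mapping, use the predefined style and emotion
--         if tone.lower() in tone_style_map:
--             return tone_style_map[tone.lower()]
--
--     # If no tone provided or not in our mapping, continue with regular analysis
--
--     # Make text lowercase for easier matching
--     topic_lower = topic.lower()
--     context_lower = context_text.lower() if context_text else ""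
--
--     # Historical content tends to work better with traditional art styles
--     historical_keywords = ['ancient', 'medieval', 'history', 'historical', 'century', 'war', 'empire',
--                            'kingdom', 'dynasty', 'revolution', 'civilization']
--
--     # Scientific content tends to work better with precise or digital styles
--     scientific_keywords = ['science', 'physics', 'chemistry', 'biology', 'mathematics',
--                            'quantum', 'molecular', 'scientific', 'theory', 'experiment']
--
--     # Technological content tends to work better with digital or futuristic styles
--     tech_keywords = ['technology', 'computer', 'digital', 'internet', 'software', 'hardware',
--                      'algorithm', 'data', 'artificial intelligence', 'machine learning']
--
--     # Natural subjects tend to work better with photographic styles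
--     nature_keywords = ['nature', 'animal', 'plant', 'forest', 'ocean', 'mountain', 'landscape',
--                        'wildlife', 'ecosystem', 'environment', 'biology']
--
--     # Abstract concepts tend to work better with abstract or surrealist styles
--     abstract_keywords = ['idea', 'concept', 'philosophy', 'abstract', 'theory', 'consciousness',
--                         'emotion', 'feeling', 'dream', 'perception', 'reality']
--
--     # Determine if topic matches any of our categories
--     is_historical = any(keyword in topic_lower or keyword in context_lower for keyword in historical_keywords)
--     is_scientific = any(keyword in topic_lower or keyword in context_lower for keyword in scientific_keywords)
--     is_tech = any(keyword in topic_lower or keyword in context_lower for keyword in tech_keywords)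
--     is_nature = any(keyword in topic_lower or keyword in context_lower for keyword in nature_keywords)
--     is_abstract = any(keyword in topic_lower or keyword in context_lower for keyword in abstract_keywords)
--
--     # Choose a style based on the topic categorization
--     if is_historical:
--         style = "oil painting"
--         emotion = "nostalgic"
--     elif is_scientific:
--         style = "scientific illustration"
--         emotion = "curious"
--     elif is_tech:
--         style = "digital art"
--         emotion = "futuristic"
--     elif is_nature:
--         style = "nature photography"
--         emotion = "serene"
--     elif is_abstract:
--         style = "abstract art"
--         emotion = "contemplative"
--     else:
--         # Default to photorealistic as it tends to work well with many topics
--         style = "photorealistic"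
--         emotion = None
--
--     return style, emotion
-- ===== SOURCE B (Python) =====
-- _TONE_MAP = {
--     "dramatic": ("cinematic", "intense"),
--     "poetic": ("artistic", "contemplative"),
--     "humorous": ("cartoon", "playful"),
--     "technical": ("digital art", "precise"),
--     "simple": ("minimalist", "calm"),
--     "informative": ("realistic", "neutral"),
-- }
--
-- _STYLES = [
--     ("oil painting", "nostalgic"),
--     ("scientific illustration", "curious"),
--     ("digital art", "futuristic"),
--     ("nature photography", "serene"),
--     ("abstract art", "contemplative"),
-- ]
--
-- # Flat keyword -> priority-rank index, flattening the five category lists.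
-- # A keyword occurring in two categories (e.g. 'biology', 'theory') keeps its
-- # highest-priority (smallest) rank, which is what the category order implies.
-- _KEYWORD_RANK = {}
-- for _rank, _kws in enumerate([
--     ['ancient', 'medieval', 'history', 'historical', 'century', 'war', 'empire',
--      'kingdom', 'dynasty', 'revolution', 'civilization'],
--     ['science', 'physics', 'chemistry', 'biology', 'mathematics',
--      'quantum', 'molecular', 'scientific', 'theory', 'experiment'],
--     ['technology', 'computer', 'digital', 'internet', 'software', 'hardware',
--      'algorithm', 'data', 'artificial intelligence', 'machine learning'],
--     ['nature', 'animal', 'plant', 'forest', 'ocean', 'mountain', 'landscape',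
--      'wildlife', 'ecosystem', 'environment', 'biology'],
--     ['idea', 'concept', 'philosophy', 'abstract', 'theory', 'consciousness',
--      'emotion', 'feeling', 'dream', 'perception', 'reality'],
-- ]):
--     for _k in _kws:
--         _KEYWORD_RANK.setdefault(_k, _rank)
--
--
-- def _analyze_with_rules(topic, context_text, tone=None):
--     if tone:
--         key = tone.lower()
--         if key in _TONE_MAP:
--             return _TONE_MAP[key]
--     t = topic.lower()
--     c = context_text.lower() if context_text else ""
--     # Single pass over the flat keyword map, keeping the best (smallest) rank
--     # among matching keywords; skips the substring test once it cannot improve.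
--     best = None
--     for k, r in _KEYWORD_RANK.items():
--         if (best is None or r < best) and (k in t or k in c):
--             best = r
--     if best is None:
--         return "photorealistic", None
--     return _STYLES[best]
-- ===== Notes on version B (the rewrite author's own statement) =====
-- stated objective: alternative
-- what changed: Replaces the five eagerly-computed category booleans and the five-way if/elif chain with a flat keyword-to-priority-rank dict scanned in a single accumulator loop that keeps the minimal matching rank, then indexes a style table.
import Mathlib
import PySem

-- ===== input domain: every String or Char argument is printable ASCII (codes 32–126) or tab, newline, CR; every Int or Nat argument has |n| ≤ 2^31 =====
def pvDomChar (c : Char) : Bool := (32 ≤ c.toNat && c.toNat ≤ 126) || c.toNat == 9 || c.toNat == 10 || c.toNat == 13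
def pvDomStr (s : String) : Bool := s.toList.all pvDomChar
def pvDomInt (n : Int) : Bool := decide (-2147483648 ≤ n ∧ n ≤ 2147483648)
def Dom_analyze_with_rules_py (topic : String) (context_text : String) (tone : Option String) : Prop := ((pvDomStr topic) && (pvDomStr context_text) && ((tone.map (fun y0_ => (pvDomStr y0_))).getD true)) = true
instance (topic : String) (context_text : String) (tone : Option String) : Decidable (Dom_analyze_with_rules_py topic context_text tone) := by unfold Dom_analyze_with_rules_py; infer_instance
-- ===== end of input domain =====

-- B replaces A's five eager category booleans + if/elif chain by one flat
-- keyword→rank map scanned once for the minimal matching rank (alternative algorithm, same results).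

-- ===== PORT A =====
-- Shared literal constants (the keyword lists and the tone map appear verbatim in both Pythons).
def pvKwHist : List String := ["ancient", "medieval", "history", "historical", "century", "war", "empire", "kingdom", "dynasty", "revolution", "civilization"]
def pvKwSci : List String := ["science", "physics", "chemistry", "biology", "mathematics", "quantum", "molecular", "scientific", "theory", "experiment"]
def pvKwTech : List String := ["technology", "computer", "digital", "internet", "software", "hardware", "algorithm", "data", "artificial intelligence", "machine learning"]
def pvKwNature : List String := ["nature", "animal", "plant", "forest", "ocean", "mountain", "landscape", "wildlife", "ecosystem", "environment", "biology"]
def pvKwAbstract : List String := ["idea", "concept", "philosophy", "abstract", "theory", "consciousness", "emotion", "feeling", "dream", "perception", "reality"]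
def pvToneMap : PySem.Dict String (String × String) :=
  PySem.Dict.ofList [("dramatic", ("cinematic", "intense")), ("poetic", ("artistic", "contemplative")),
    ("humorous", ("cartoon", "playful")), ("technical", ("digital art", "precise")),
    ("simple", ("minimalist", "calm")), ("informative", ("realistic", "neutral"))]

-- A's post-tone analysis: lowercase both texts, compute the five category flags eagerly,
-- then choose style/emotion by the if/elif chain.
def pvBodyA (topic : String) (context_text : String) : String × Option String :=
  let topic_lower := PySem.Str.lower topic
  let context_lower := if context_text ≠ "" then PySem.Str.lower context_text else ""
  let hit := fun (k : String) => PySem.Str.isIn k topic_lower || PySem.Str.isIn k context_lower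
  let is_historical := pvKwHist.any hit
  let is_scientific := pvKwSci.any hit
  let is_tech := pvKwTech.any hit
  let is_nature := pvKwNature.any hit
  let is_abstract := pvKwAbstract.any hit
  if is_historical then ("oil painting", some "nostalgic")
  else if is_scientific then ("scientific illustration", some "curious")
  else if is_tech then ("digital art", some "futuristic")
  else if is_nature then ("nature photography", some "serene")
  else if is_abstract then ("abstract art", some "contemplative")
  else ("photorealistic", none)

def analyze_with_rules_py (topic : String) (context_text : String) (tone : Option String) : String × Option String :=
  match tone with
  | some t =>
    if t ≠ "" then
      -- 'if tone.lower() in tone_style_map: return tone_style_map[tone.lower()]'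
      match pvToneMap.get? (PySem.Str.lower t) with
      | some (s, e) => (s, some e)
      | none => pvBodyA topic context_text
    else pvBodyA topic context_text
  | none => pvBodyA topic context_text

-- ===== PORT B =====
def pvStyles : List (String × String) :=
  [("oil painting", "nostalgic"), ("scientific illustration", "curious"), ("digital art", "futuristic"),
   ("nature photography", "serene"), ("abstract art", "contemplative")]

-- '_KEYWORD_RANK = {}; for _rank, _kws in enumerate([…]): for _k in _kws: _KEYWORD_RANK.setdefault(_k, _rank)'
def pvKeywordRank : PySem.Dict String Int :=
  (PySem.List.enumerate [pvKwHist, pvKwSci, pvKwTech, pvKwNature, pvKwAbstract]).foldl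
    (fun d p => p.2.foldl (fun d k => d.setdefault k p.1) d) PySem.Dict.empty

-- the loop body: '(best is None or r < best) and (k in t or k in c)'
def pvStep (t c : String) (best : Option Int) (p : String × Int) : Option Int :=
  if (best.elim true (fun b => p.2 < b)) && (PySem.Str.isIn p.1 t || PySem.Str.isIn p.1 c) then some p.2
  else best

-- B's post-tone analysis: one pass over the flat keyword→rank map keeping the minimal
-- matching rank, then index into _STYLES.
def pvBodyB (topic : String) (context_text : String) : String × Option String :=
  let t := PySem.Str.lower topic
  let c := if context_text ≠ "" then PySem.Str.lower context_text else ""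
  match pvKeywordRank.items.foldl (pvStep t c) none with
  | none => ("photorealistic", none)
  | some i =>
    -- '_STYLES[best]': every stored rank is 0..4, so the lookup always succeeds;
    -- the fallback arm is unreachable.
    match PySem.List.pyGet? pvStyles i with
    | some (s, e) => (s, some e)
    | none => ("photorealistic", none)

def analyze_with_rules_py_alt (topic : String) (context_text : String) (tone : Option String) : String × Option String :=
  match tone with
  | some t =>
    if t ≠ "" then
      -- 'key = tone.lower(); if key in _TONE_MAP: return _TONE_MAP[key]'
      match pvToneMap.get? (PySem.Str.lower t) with
      | some (s, e) => (s, some e)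
      | none => pvBodyB topic context_text
    else pvBodyB topic context_text
  | none => pvBodyB topic context_text

-- ===== PRECONDITION & SPEC =====
def Spec_analyze_with_rules_py (topic : String) (context_text : String) (tone : Option String) (out : String × Option String) : Prop := out = analyze_with_rules_py_alt topic context_text tone
instance (topic : String) (context_text : String) (tone : Option String) (out : String × Option String) : Decidable (Spec_analyze_with_rules_py topic context_text tone out) := by unfold Spec_analyze_with_rules_py; infer_instance

-- ===== CLAIM =====
def Claim_equal_analyze_with_rules_py : Prop := ∀ (topic : String) (context_text : String) (tone : Option String), Dom_analyze_with_rules_py topic context_text tone → Spec_analyze_with_rules_py topic context_text tone (analyze_with_rules_py topic context_text tone)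

-- ===== LEMMAS AND PROOFS =====

-- once 'best' holds a rank no larger than every remaining rank, the loop keeps it
theorem pvFold_stay (t c : String) (b : Int) :
    ∀ (l : List (String × Int)), (∀ p ∈ l, b ≤ p.2) →
      l.foldl (pvStep t c) (some b) = some b := by
  intro l
  induction l with
  | nil => intro _; rfl
  | cons p l ih =>
    intro h
    have hb : b ≤ p.2 := h p (List.mem_cons_self ..)
    have hstep : pvStep t c (some b) p = some b := by
      unfold pvStep
      have : decide (p.2 < b) = false := by
        simp only [decide_eq_false_iff_not]; omega
      simp [Option.elim, this]
    simp only [List.foldl_cons, hstep]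
    exact ih (fun q hq => h q (List.mem_cons_of_mem _ hq))

-- a group of entries all carrying rank r: the loop from 'none' returns 'some r'
-- exactly when some entry's keyword matches
theorem pvFold_group (t c : String) (r : Int) :
    ∀ (l : List (String × Int)), (∀ p ∈ l, p.2 = r) →
      l.foldl (pvStep t c) none =
        if l.any (fun p => PySem.Str.isIn p.1 t || PySem.Str.isIn p.1 c) then some r else none := by
  intro l
  induction l with
  | nil => intro _; rfl
  | cons p l ih =>
    intro h
    have hr : p.2 = r := h p (List.mem_cons_self ..)
    have hrest : ∀ q ∈ l, q.2 = r := fun q hq => h q (List.mem_cons_of_mem _ hq)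
    cases hp : (PySem.Str.isIn p.1 t || PySem.Str.isIn p.1 c) with
    | true =>
      have hstep : pvStep t c none p = some r := by
        unfold pvStep; rw [hp, hr]; rfl
      simp only [List.foldl_cons, hstep, List.any_cons, hp, Bool.true_or, if_true]
      exact pvFold_stay t c r l (fun q hq => le_of_eq (hrest q hq).symm)
    | false =>
      have hstep : pvStep t c none p = none := by
        unfold pvStep; rw [hp]; rfl
      simp only [List.foldl_cons, hstep, List.any_cons, hp, Bool.false_or]
      exact ih hrest

-- proof-only: a category list tagged with its rank
def pvG (l : List String) (r : Int) : List (String × Int) := l.map (fun k => (k, r))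

-- pvFold_group specialised to a rank-tagged category list
theorem pvFold_group' (t c : String) (l : List String) (r : Int) :
    (pvG l r).foldl (pvStep t c) none =
      if l.any (fun k => PySem.Str.isIn k t || PySem.Str.isIn k c) then some r else none := by
  rw [pvFold_group t c r (pvG l r) (by simp [pvG])]
  simp only [pvG, List.any_map]
  rfl

-- proof-only: the nature/abstract lists minus the keywords already ranked by an
-- earlier category ('biology' in sci, 'theory' in sci)
def pvKwNatureRest : List String := ["nature", "animal", "plant", "forest", "ocean", "mountain", "landscape", "wildlife", "ecosystem", "environment"]
def pvKwAbstractRest : List String := ["idea", "concept", "philosophy", "abstract", "consciousness", "emotion", "feeling", "dream", "perception", "reality"]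

set_option maxRecDepth 10000 in
theorem pvItems_eq : pvKeywordRank.items =
    pvG pvKwHist 0 ++ (pvG pvKwSci 1 ++ (pvG pvKwTech 2 ++ (pvG pvKwNatureRest 3 ++ pvG pvKwAbstractRest 4))) := by
  decide

theorem pvBody_eq (topic context_text : String) :
    pvBodyA topic context_text = pvBodyB topic context_text := by
  unfold pvBodyA pvBodyB
  generalize PySem.Str.lower topic = t
  generalize (if context_text ≠ "" then PySem.Str.lower context_text else "") = c
  rw [pvItems_eq]
  simp only [List.foldl_append]
  cases h0 : (pvKwHist.any fun k => PySem.Str.isIn k t || PySem.Str.isIn k c) with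
  | true =>
    rw [pvFold_group' t c pvKwHist 0]
    simp only [h0, if_true]
    rw [pvFold_stay t c 0 _ (by decide), pvFold_stay t c 0 _ (by decide),
        pvFold_stay t c 0 _ (by decide), pvFold_stay t c 0 _ (by decide)]
    rfl
  | false =>
    rw [pvFold_group' t c pvKwHist 0]
    simp only [h0, Bool.false_eq_true, if_false]
    cases h1 : (pvKwSci.any fun k => PySem.Str.isIn k t || PySem.Str.isIn k c) with
    | true =>
      rw [pvFold_group' t c pvKwSci 1]
      simp only [h1, if_true]
      rw [pvFold_stay t c 1 _ (by decide), pvFold_stay t c 1 _ (by decide),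
          pvFold_stay t c 1 _ (by decide)]
      rfl
    | false =>
      rw [pvFold_group' t c pvKwSci 1]
      simp only [h1, Bool.false_eq_true, if_false]
      -- no scientific keyword matches, so neither 'biology' nor 'theory' matches:
      have hbio : (PySem.Str.isIn "biology" t || PySem.Str.isIn "biology" c) = false :=
        Bool.eq_false_iff.mpr (List.any_eq_false.mp h1 "biology" (by decide))
      have hth : (PySem.Str.isIn "theory" t || PySem.Str.isIn "theory" c) = false :=
        Bool.eq_false_iff.mpr (List.any_eq_false.mp h1 "theory" (by decide))
      -- hence the full nature/abstract lists match iff their deduplicated rests do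
      have hnat : (pvKwNature.any fun k => PySem.Str.isIn k t || PySem.Str.isIn k c)
          = (pvKwNatureRest.any fun k => PySem.Str.isIn k t || PySem.Str.isIn k c) := by
        simp only [pvKwNature, pvKwNatureRest, List.any_cons, List.any_nil, hbio,
          Bool.or_false]
      have habs : (pvKwAbstract.any fun k => PySem.Str.isIn k t || PySem.Str.isIn k c)
          = (pvKwAbstractRest.any fun k => PySem.Str.isIn k t || PySem.Str.isIn k c) := by
        simp only [pvKwAbstract, pvKwAbstractRest, List.any_cons, List.any_nil, hth,
          Bool.false_or]
      cases h2 : (pvKwTech.any fun k => PySem.Str.isIn k t || PySem.Str.isIn k c) with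
      | true =>
        rw [pvFold_group' t c pvKwTech 2]
        simp only [h2, if_true]
        rw [pvFold_stay t c 2 _ (by decide), pvFold_stay t c 2 _ (by decide)]
        rfl
      | false =>
        rw [pvFold_group' t c pvKwTech 2]
        simp only [h2, Bool.false_eq_true, if_false]
        rw [pvFold_group' t c pvKwNatureRest 3]
        cases h3 : (pvKwNatureRest.any fun k => PySem.Str.isIn k t || PySem.Str.isIn k c) with
        | true =>
          simp only [hnat, h3, if_true]
          rw [pvFold_stay t c 3 _ (by decide)]
          rfl
        | false =>
          simp only [hnat, h3, Bool.false_eq_true, if_false]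
          rw [pvFold_group' t c pvKwAbstractRest 4]
          cases h4 : (pvKwAbstractRest.any fun k => PySem.Str.isIn k t || PySem.Str.isIn k c) with
          | true =>
            simp only [habs, h4, if_true]
            rfl
          | false => simp only [habs, h4, Bool.false_eq_true, if_false]

-- congruence for the shared tone-dict early return: only the fallthrough body differs
theorem pvTone_congr (o : Option (String × String)) (a b : String × Option String) (h : a = b) :
    (match o with | some (s, e) => (s, some e) | none => a)
      = (match o with | some (s, e) => (s, some e) | none => b) := by
  cases o with
  | none => exact h
  | some p => rfl

-- ===== VERDICT (by name: the statement is the Claim_ definition above) =====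
theorem analyze_with_rules_py_spec : Claim_equal_analyze_with_rules_py := by
  intro topic context_text tone _h
  unfold Spec_analyze_with_rules_py analyze_with_rules_py analyze_with_rules_py_alt
  have hb := pvBody_eq topic context_text
  cases tone with
  | none => exact hb
  | some t =>
    dsimp only
    by_cases ht : t ≠ ""
    · rw [if_pos ht, if_pos ht]
      exact pvTone_congr _ _ _ hb
    · rw [if_neg ht, if_neg ht]
      exact hb
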